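-- pv_equiv track=rewrite | github.com/MossyPebble/Biwa-DataPlotter | utils/HSPICEParser.py | detect_column_starts
-- ===== SOURCE A (Python) =====
-- from typing import List, Tuple
--
-- def detect_column_starts(lines: List[str]) -> List[int]:
--
--     """
--         C++의 gutter detection과 동일한 방식:
--         - 블록의 모든 줄을 보고, 특정 문자 위치 i가 '모든 줄에서 공백'이면 gutter(True)
--         - gutter -> text로 바뀌는 지점을 column start로 기록
--     """
--
--     if not lines:
--         return []
--
--     max_width = max(len(l) for l in lines)
--     is_gutter = [True] * max_width
--
--     for l in lines:
--         for i, ch in enumerate(l):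
--             if not ch.isspace():
--                 is_gutter[i] = False
--
--     column_starts: List[int] = []
--     in_gutter = True
--     for i in range(max_width):
--         if in_gutter and not is_gutter[i]:
--             column_starts.append(i)
--             in_gutter = False
--         elif (not in_gutter) and is_gutter[i]:
--             in_gutter = True
--
--     return column_starts
-- ===== SOURCE B (Python) =====
-- from typing import List
--
-- def detect_column_starts(lines: List[str]) -> List[int]:
--     # Same gutter semantics without the mask array or the in_gutter state machine:
--     # a column start is a non-gutter column whose left neighbour is a gutter (or column 0).
--     if not lines:
--         return []
--
--     max_width = max(len(l) for l in lines)
--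
--     def gutter(i: int) -> bool:
--         return all(i >= len(l) or l[i].isspace() for l in lines)
--
--     return [i for i in range(max_width) if not gutter(i) and (i == 0 or gutter(i - 1))]
-- ===== Notes on version B (the rewrite author's own statement) =====
-- stated objective: simpler
-- what changed: Replaced the precomputed boolean gutter mask and the in_gutter state-machine loop by a direct comprehension: a column start is a non-gutter column whose left neighbour (if any) is a gutter, with gutter-ness tested on demand via a short-circuiting all() over the lines.
import Mathlib
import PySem

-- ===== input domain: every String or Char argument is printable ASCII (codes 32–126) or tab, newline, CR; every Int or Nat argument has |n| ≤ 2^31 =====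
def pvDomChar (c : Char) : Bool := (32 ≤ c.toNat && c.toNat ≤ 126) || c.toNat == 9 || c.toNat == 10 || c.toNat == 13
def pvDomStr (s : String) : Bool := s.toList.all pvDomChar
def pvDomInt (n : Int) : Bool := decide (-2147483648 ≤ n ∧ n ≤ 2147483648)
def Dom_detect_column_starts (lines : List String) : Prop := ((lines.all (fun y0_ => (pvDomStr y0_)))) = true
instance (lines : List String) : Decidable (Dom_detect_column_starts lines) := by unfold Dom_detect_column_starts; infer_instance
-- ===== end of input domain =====

-- B drops A's boolean gutter mask and in_gutter state machine: a comprehension keeps the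
-- non-gutter columns whose left neighbour (or nothing) is a gutter; equivalence proved below.

-- ===== PORT A =====
def detect_column_starts (lines : List String) : List Int :=
  if lines = [] then []
  else
    let max_width : Int := (PySem.List.max? (lines.map (fun l => PySem.Str.len l)) (fun x => x)).getD 0
    let is_gutter : List Bool := PySem.List.pyRepeat [true] max_width
    let is_gutter : List Bool :=
      lines.foldl (fun m l =>
        (PySem.List.enumerate l.toList 0).foldl (fun m p =>
          if ¬ PySem.Chars.isspace p.2 then PySem.List.pySetD m p.1 false else m) m) is_gutter
    let fin :=
      (PySem.List.pyRange 0 max_width 1).foldl (fun (st : List Int × Bool) i =>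
        if st.2 && !(PySem.List.pyGetD is_gutter i true) then (st.1 ++ [i], false)
        else if !st.2 && PySem.List.pyGetD is_gutter i true then (st.1, true)
        else st) ([], true)
    fin.1

-- ===== PORT B =====
-- B's gutter test: all(i >= len(l) or l[i].isspace() for l in lines)
def gutterB (lines : List String) (i : Int) : Bool :=
  lines.all (fun l =>
    decide (PySem.Str.len l ≤ i) ||
    (match PySem.Str.pyGet? l i with
     | some c => PySem.Chars.isspace c
     | none => true))

def detect_column_starts_alt (lines : List String) : List Int :=
  if lines = [] then []
  else
    let max_width : Int := (PySem.List.max? (lines.map (fun l => PySem.Str.len l)) (fun x => x)).getD 0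
    (PySem.List.pyRange 0 max_width 1).filter
      (fun i => !gutterB lines i && (i == 0 || gutterB lines (i - 1)))

-- ===== PRECONDITION & SPEC =====
def Spec_detect_column_starts (lines : List String) (out : List Int) : Prop := out = detect_column_starts_alt lines
instance (lines : List String) (out : List Int) : Decidable (Spec_detect_column_starts lines out) := by unfold Spec_detect_column_starts; infer_instance

-- ===== CLAIM (what is proved, stated in full; the proofs are below) =====
def Claim_equal_detect_column_starts : Prop := ∀ (lines : List String), Dom_detect_column_starts lines → Spec_detect_column_starts lines (detect_column_starts lines)

-- ===== LEMMAS AND PROOFS =====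

-- A's mask update for one line, over the enumerated characters
def lineStep (m : List Bool) (cs : List (Int × Char)) : List Bool :=
  cs.foldl (fun m p => if ¬ PySem.Chars.isspace p.2 then PySem.List.pySetD m p.1 false else m) m

lemma lineStep_length (m : List Bool) (cs : List (Int × Char)) :
    (lineStep m cs).length = m.length := by
  induction cs generalizing m with
  | nil => rfl
  | cons p cs ih =>
      simp only [lineStep, List.foldl_cons] at *
      by_cases h : PySem.Chars.isspace p.2
      · rw [if_neg (by simp [h])]; exact ih m
      · rw [if_pos (by simp [h])]; rw [ih]; simp [PySem.List.length_pySetD]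

-- pointwise value of the mask after one line's inner loop (start index s, j a Nat index)
lemma lineStep_getD (m : List Bool) (cs : List Char) (s : Nat) (j : Nat) (hjm : j < m.length) :
    (lineStep m (PySem.List.enumerate cs (s : Int))).getD j true =
      (m.getD j true &&
        !(decide (s ≤ j) && decide (j - s < cs.length) && !PySem.Chars.isspace (cs.getD (j - s) ' '))) := by
  induction cs generalizing m s with
  | nil =>
      simp [lineStep, PySem.List.enumerate_nil]
  | cons c cs ih =>
      rw [PySem.List.enumerate_cons, show ((s : Int) + 1) = ((s + 1 : Nat) : Int) by push_cast; ring]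
      simp only [lineStep, List.foldl_cons]
      by_cases hsp : PySem.Chars.isspace c
      · have hrec := ih m (s + 1) hjm
        simp only [lineStep] at hrec
        rw [if_neg (by simp [hsp]), hrec]
        by_cases hj : j = s
        · subst hj; simp [hsp, show ¬ (j + 1 ≤ j) by omega]
        · by_cases hle : s ≤ j
          · have h1 : s + 1 ≤ j := by omega
            have h2 : j - (s + 1) = j - s - 1 := by omega
            have h3 : j - s ≠ 0 := by omega
            rcases Nat.exists_eq_succ_of_ne_zero h3 with ⟨t, ht⟩
            simp [hle, h1, h2, ht] <;> omega
          · simp [hle, show ¬ (s + 1 ≤ j) by omega]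
      · rw [if_pos (by simp [hsp])]
        have hrec := ih (PySem.List.pySetD m (s : Int) false) (s + 1)
          (by rw [PySem.List.pySetD_natCast]; simpa using hjm)
        simp only [lineStep] at hrec
        rw [hrec]
        have hset : (PySem.List.pySetD m (s : Int) false).getD j true =
            if j = s then false else m.getD j true := by
          rw [PySem.List.pySetD_natCast]
          by_cases hj : j = s
          · subst hj
            simp [List.getD_eq_getElem?_getD, List.getElem?_set, hjm]
          · simp [List.getD_eq_getElem?_getD, List.getElem?_set, hj, Ne.symm hj]
        rw [hset]
        by_cases hj : j = s
        · subst hj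
          simp [show ¬ (j + 1 ≤ j) by omega, hsp]
        · by_cases hle : s ≤ j
          · have h1 : s + 1 ≤ j := by omega
            have h2 : j - (s + 1) = j - s - 1 := by omega
            have h3 : j - s ≠ 0 := by omega
            rcases Nat.exists_eq_succ_of_ne_zero h3 with ⟨t, ht⟩
            simp [hle, h1, h2, hj, ht] <;> omega
          · simp [hle, show ¬ (s + 1 ≤ j) by omega, hj]

-- one line's contribution at column j equals B's per-line gutter test at j
lemma lineTest_eq (l : String) (j : Nat) :
    (!(decide ((0:Nat) ≤ j) && decide (j - 0 < l.toList.length) && !PySem.Chars.isspace (l.toList.getD (j - 0) ' '))) =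
      (decide (PySem.Str.len l ≤ (j : Int)) ||
        (match PySem.Str.pyGet? l (j : Int) with
         | some c => PySem.Chars.isspace c
         | none => true)) := by
  simp only [Nat.sub_zero, Nat.zero_le, decide_true, Bool.true_and]
  by_cases hlt : j < l.toList.length
  · have hg : PySem.Str.pyGet? l (j : Int) = some (l.toList.getD j ' ') := by
      simp [PySem.Str.pyGet?_eq, PySem.List.pyGet?_natCast, List.getD_eq_getElem?_getD,
        List.getElem?_eq_getElem hlt]
    rw [hg]
    simp only [String.length_toList] at hlt
    simp [hlt, PySem.Str.len, ← decide_not, Nat.not_lt]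
  · have hg : PySem.Str.pyGet? l (j : Int) = none := by
      simp [PySem.Str.pyGet?_eq, PySem.List.pyGet?_natCast,
        List.getElem?_eq_none (by omega : l.toList.length ≤ j)]
    rw [hg]
    simp only [String.length_toList] at hlt
    simp [hlt, PySem.Str.len, ← decide_not, Nat.not_lt]

-- once false at j, the mask stays false at j
lemma mask_stays_false (lines : List String) (m : List Bool) (j : Nat) (hjm : j < m.length)
    (hm : m.getD j true = false) :
    ((lines.foldl (fun m l => lineStep m (PySem.List.enumerate l.toList 0)) m).getD j true) = false := by
  induction lines generalizing m with
  | nil => simpa [List.getD_eq_getElem?_getD] using hm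
  | cons l ls ih =>
      simp only [List.foldl_cons]
      apply ih _ (by rw [lineStep_length]; exact hjm)
      rw [show (0 : Int) = ((0 : Nat) : Int) by norm_num, lineStep_getD _ _ _ _ hjm, hm]
      simp

-- the full mask read at a Nat index j equals B's gutter test, when the initial mask is true there
lemma mask_getD (lines : List String) (m : List Bool) (j : Nat) (hjm : j < m.length)
    (hm : m.getD j true = true) :
    ((lines.foldl (fun m l => lineStep m (PySem.List.enumerate l.toList 0)) m).getD j true) =
      gutterB lines (j : Int) := by
  induction lines generalizing m with
  | nil => simpa [gutterB, List.getD_eq_getElem?_getD] using hm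
  | cons l ls ih =>
      simp only [List.foldl_cons, gutterB, List.all_cons]
      by_cases hl : (decide (PySem.Str.len l ≤ (j : Int)) ||
          (match PySem.Str.pyGet? l (j : Int) with
           | some c => PySem.Chars.isspace c
           | none => true)) = true
      · rw [hl, Bool.true_and]
        rw [ih (lineStep m (PySem.List.enumerate l.toList 0))
            (by rw [lineStep_length]; exact hjm)
            (by rw [show (0 : Int) = ((0 : Nat) : Int) by norm_num, lineStep_getD _ _ _ _ hjm, hm,
                    Bool.true_and, lineTest_eq, hl])]
        rfl
      · simp only [Bool.not_eq_true] at hl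
        rw [hl, Bool.false_and]
        apply mask_stays_false _ _ _ (by rw [lineStep_length]; exact hjm)
        rw [show (0 : Int) = ((0 : Nat) : Int) by norm_num, lineStep_getD _ _ _ _ hjm, hm,
            Bool.true_and, lineTest_eq, hl]

-- state machine over [0,…,k-1] equals the filter characterization
lemma fold_filter (g : Int → Bool) (k : Nat) :
    (((List.range k).map (fun j : Nat => (j : Int))).foldl (fun (st : List Int × Bool) i =>
        if st.2 && !(g i) then (st.1 ++ [i], false)
        else if !st.2 && g i then (st.1, true)
        else st) ([], true)) =
      (((List.range k).map (fun j : Nat => (j : Int))).filter (fun i => !g i && (i == 0 || g (i - 1))),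
        (decide (k = 0) || g ((k : Int) - 1))) := by
  induction k with
  | zero => simp
  | succ k ih =>
      rw [List.range_succ]
      rw [List.map_append, List.foldl_append, List.filter_append, ih]
      simp only [List.map_cons, List.map_nil, List.foldl_cons, List.foldl_nil, List.filter_cons,
        List.filter_nil]
      by_cases hk : k = 0
      · subst hk
        cases hg0 : g 0 <;> simp [hg0]
      · have hcast : ((k : Int) == 0) = false := by
          simpa using hk
        simp only [decide_eq_false hk, Bool.false_or, hcast, Nat.add_eq_zero_iff,
          push_cast, add_sub_cancel_right]
        cases hk1 : g ((k : Int) - 1) <;> cases hgk : g (k : Int) <;>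
          simp [hk1, hgk, hcast, add_sub_cancel_right]

-- ===== VERDICT (by name: the statement is the Claim_ definition above) =====
theorem detect_column_starts_spec : Claim_equal_detect_column_starts := by
  intro lines _
  unfold Spec_detect_column_starts detect_column_starts detect_column_starts_alt
  by_cases h : lines = []
  · simp [h]
  · simp only [h, if_false]
    cases hmax : PySem.List.max? (lines.map (fun l => PySem.Str.len l)) (fun x => x) with
    | none =>
        rw [PySem.List.max?_eq_none_iff] at hmax
        simp at hmax
        exact absurd hmax h
    | some m =>
        have hmem := PySem.List.max?_mem hmax
        have hm0 : 0 ≤ m := by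
          rcases List.mem_map.mp hmem with ⟨l, _, rfl⟩
          simp [PySem.Str.len]
        have hWt : ((m.toNat : Nat) : Int) = m := Int.toNat_of_nonneg hm0
        simp only [Option.getD_some]
        rw [← hWt, PySem.List.pyRange_zero_natCast]
        simp only [PySem.List.pyRepeat_singleton, Int.toNat_natCast]
        set mask := lines.foldl (fun mk l =>
            (PySem.List.enumerate l.toList 0).foldl
              (fun mk p => if ¬ PySem.Chars.isspace p.2 then PySem.List.pySetD mk p.1 false else mk) mk)
            (List.replicate m.toNat true) with hmaskdef
        have hmaskget : ∀ k : Nat, k < m.toNat →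
            PySem.List.pyGetD mask (k : Int) true = gutterB lines (k : Int) := by
          intro k hk
          have hlen : k < (List.replicate m.toNat true).length := by
            simpa using hk
          have hinit : (List.replicate m.toNat true).getD k true = true := by
            simp [List.getD_eq_getElem?_getD, List.getElem?_replicate]
            split <;> simp
          have := mask_getD lines (List.replicate m.toNat true) k hlen hinit
          simp only [lineStep] at this
          rw [PySem.List.pyGetD_natCast, hmaskdef]
          exact this
        have hcong := PySem.List.foldl_congr_mem
          (l := (List.range m.toNat).map (fun k : Nat => (k : Int)))
          (init := (([] : List Int), true))
          (f := fun (st : List Int × Bool) i =>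
            if st.2 && !(PySem.List.pyGetD mask i true) then (st.1 ++ [i], false)
            else if !st.2 && PySem.List.pyGetD mask i true then (st.1, true) else st)
          (g := fun (st : List Int × Bool) i =>
            if st.2 && !(gutterB lines i) then (st.1 ++ [i], false)
            else if !st.2 && gutterB lines i then (st.1, true) else st)
          (by intro acc x hx
              rcases List.mem_map.mp hx with ⟨k, hk, rfl⟩
              simp only [hmaskget k (List.mem_range.mp hk)])
        rw [hcong, fold_filter]
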